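-- pv_equiv track=rewrite | github.com/vrangr1/BattleCode2023 | scripts/bfsgen.py | gen_bfs
-- ===== SOURCE A (Python) =====
-- def encode(x, y):
--     return (x+7) + 15*(y+7)
--
-- DIRECTIONS = {
--     (1, 0): 'Direction.EAST',
--     (-1, 0): 'Direction.WEST',
--     (0, 1): 'Direction.NORTH',
--     (0, -1): 'Direction.SOUTH',
--     (1, 1): 'Direction.NORTHEAST',
--     (-1, 1): 'Direction.NORTHWEST',
--     (1, -1): 'Direction.SOUTHEAST',
--     (-1, -1): 'Direction.SOUTHWEST',
-- }
--
-- def dist(x, y):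
--     return x*x + y*y
--
-- def gen_bfs(radius, unit):
--     visited = set([encode(0,0)])
--     if unit == 'Carrier':
--         occupied_val = 8
--     else:
--         occupied_val = 2
--     out = f"""
-- """
--     for r2 in range(1, radius+1):
--         for x in range(-7, 8):
--             for y in range(-7, 8):
--                 if dist(x, y) == r2:
--                     out += f"""
--         if (rc.canSenseLocation(l{encode(x,y)})) {{ // check ({x}, {y})"""
--                     indent = ""
--                     if r2 <= occupied_val:
--                         out += f"""
--             if (!rc.isLocationOccupied(l{encode(x,y)})) {{ """
--                         indent = "    "
--                     dxdy = [(dx, dy) for dx in range(-1, 2) for dy in range(-1, 2) if (dx, dy) != (0, 0) and dist(x+dx,y+dy) <= radius]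
--                     dxdy = sorted(dxdy, key=lambda dd: dist(x+dd[0], y+dd[1]))
--                     for dx, dy in dxdy:
--                         if encode(x+dx, y+dy) in visited:
--                             out += f"""
--             {indent}if (d{encode(x,y)} > d{encode(x+dx,y+dy)}) {{ // from ({x+dx}, {y+dy})
--                 {indent}d{encode(x,y)} = d{encode(x+dx,y+dy)};
--                 {indent}dir{encode(x,y)} = {DIRECTIONS[(-dx, -dy)] if (x+dx,y+dy) == (0, 0) else f'dir{encode(x+dx,y+dy)}'};
--             {indent}}}"""
--                     out += f"""
--             {indent}d{encode(x,y)} += locationScore(l{encode(x,y)}, m{encode(x,y)}, dir{encode(x,y)});"""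
--                     if r2 <= occupied_val:
--                         out += f"""
--             }}"""
--                     visited.add(encode(x,y))
--                     out += f"""
--         }}"""
--                 if dist(x, y) == r2:
--                     out += f"""
--         else if (rc.onTheMap(l{encode(x,y)})) {{ // check ({x}, {y})"""
--                     indent = ""
--                     dxdy = [(dx, dy) for dx in range(-1, 2) for dy in range(-1, 2) if (dx, dy) != (0, 0) and dist(x+dx,y+dy) <= radius]
--                     dxdy = sorted(dxdy, key=lambda dd: dist(x+dd[0], y+dd[1]))
--                     for dx, dy in dxdy:
--                         if encode(x+dx, y+dy) in visited:
--                             out += f"""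
--             {indent}if (d{encode(x,y)} > d{encode(x+dx,y+dy)}) {{ // from ({x+dx}, {y+dy})
--                 {indent}d{encode(x,y)} = d{encode(x+dx,y+dy)};
--                 {indent}dir{encode(x,y)} = {DIRECTIONS[(-dx, -dy)] if (x+dx,y+dy) == (0, 0) else f'dir{encode(x+dx,y+dy)}'};
--             {indent}}}"""
--                     out += f"""
--             {indent}d{encode(x,y)} += 12;"""
--                     visited.add(encode(x,y))
--                     out += f"""
--         }}
-- """
--     return out
-- ===== SOURCE B (Python) =====
-- def encode(x, y):
--     return (x+7) + 15*(y+7)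
--
-- DIRECTIONS = {
--     (1, 0): 'Direction.EAST',
--     (-1, 0): 'Direction.WEST',
--     (0, 1): 'Direction.NORTH',
--     (0, -1): 'Direction.SOUTH',
--     (1, 1): 'Direction.NORTHEAST',
--     (-1, 1): 'Direction.NORTHWEST',
--     (1, -1): 'Direction.SOUTHEAST',
--     (-1, -1): 'Direction.SOUTHWEST',
-- }
--
-- def dist(x, y):
--     return x*x + y*y
--
-- def _relax_lines(radius, x, y, indent, visited):
--     dxdy = [(dx, dy) for dx in range(-1, 2) for dy in range(-1, 2)
--             if (dx, dy) != (0, 0) and dist(x+dx, y+dy) <= radius]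
--     dxdy = sorted(dxdy, key=lambda dd: dist(x+dd[0], y+dd[1]))
--     s = ""
--     for dx, dy in dxdy:
--         if encode(x+dx, y+dy) in visited:
--             tgt = DIRECTIONS[(-dx, -dy)] if (x+dx, y+dy) == (0, 0) else f'dir{encode(x+dx,y+dy)}'
--             s += f"""
--             {indent}if (d{encode(x,y)} > d{encode(x+dx,y+dy)}) {{ // from ({x+dx}, {y+dy})
--                 {indent}d{encode(x,y)} = d{encode(x+dx,y+dy)};
--                 {indent}dir{encode(x,y)} = {tgt};
--             {indent}}}"""
--     return s
--
-- def gen_bfs(radius, unit):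
--     # one stable sort of the 15x15 grid by squared distance replaces A's
--     # rescan of all 225 cells for every radius value 1..radius
--     occupied_val = 8 if unit == 'Carrier' else 2
--     cells = [(x, y) for x in range(-7, 8) for y in range(-7, 8)]
--     order = sorted(cells, key=lambda c: dist(c[0], c[1]))
--     visited = {encode(0, 0)}
--     out = "\n"
--     for x, y in order:
--         r2 = dist(x, y)
--         if r2 < 1 or r2 > radius:
--             continue
--         e = encode(x, y)
--         out += f"\n        if (rc.canSenseLocation(l{e})) {{ // check ({x}, {y})"
--         if r2 <= occupied_val:
--             indent = "    "
--             out += f"\n            if (!rc.isLocationOccupied(l{e})) {{ "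
--         else:
--             indent = ""
--         out += _relax_lines(radius, x, y, indent, visited)
--         out += f"\n            {indent}d{e} += locationScore(l{e}, m{e}, dir{e});"
--         if r2 <= occupied_val:
--             out += "\n            }"
--         visited.add(e)
--         out += "\n        }"
--         out += f"\n        else if (rc.onTheMap(l{e})) {{ // check ({x}, {y})"
--         out += _relax_lines(radius, x, y, "", visited)
--         out += f"\n            d{e} += 12;"
--         visited.add(e)
--         out += "\n        }\n"
--     return out
-- ===== Notes on version B (the rewrite author's own statement) =====
-- stated objective: faster
-- what changed: B sorts the 225 grid cells once by squared distance (a stable sort, preserving A's scan order within each distance) and emits the code in a single pass over that order with a shared relaxation-emitting helper, instead of A's rescan of all 225 cells for every r2 in range(1, radius+1).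
import Mathlib
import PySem

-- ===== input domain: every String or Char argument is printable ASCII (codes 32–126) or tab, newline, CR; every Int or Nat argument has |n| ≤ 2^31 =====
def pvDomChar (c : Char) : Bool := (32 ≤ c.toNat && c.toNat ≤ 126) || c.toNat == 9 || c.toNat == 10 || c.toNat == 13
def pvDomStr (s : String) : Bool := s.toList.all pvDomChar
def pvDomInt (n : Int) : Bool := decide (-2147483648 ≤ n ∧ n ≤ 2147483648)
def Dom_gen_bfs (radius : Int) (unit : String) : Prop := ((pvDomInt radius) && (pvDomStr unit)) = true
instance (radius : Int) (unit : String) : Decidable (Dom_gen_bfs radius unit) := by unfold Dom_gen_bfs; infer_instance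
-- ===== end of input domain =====

-- B replaces A's rescan of all 225 grid cells for every r2 in range(1, radius+1) by ONE stable
-- sort of the 225 cells by squared distance and a single pass over it (objective: faster).

-- ===== PORT A =====
-- shared module-level helpers (used verbatim by both Pythons)
def pyEncode (x y : Int) : Int := (x + 7) + 15 * (y + 7)

def pyDist (x y : Int) : Int := x * x + y * y

def DIRECTIONS : PySem.Dict (Int × Int) String := PySem.Dict.ofList
  [((1, 0), "Direction.EAST"), ((-1, 0), "Direction.WEST"),
   ((0, 1), "Direction.NORTH"), ((0, -1), "Direction.SOUTH"),
   ((1, 1), "Direction.NORTHEAST"), ((-1, 1), "Direction.NORTHWEST"),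
   ((1, -1), "Direction.SOUTHEAST"), ((-1, -1), "Direction.SOUTHWEST")]

-- DIRECTIONS[p]; every lookup both programs perform hits an existing key, so the default is dead
def dirAt (p : Int × Int) : String := (PySem.Dict.get? DIRECTIONS p).getD ""

-- the relaxation text both Pythons emit per in-visited neighbour (identical f-string in both)
def relaxPiece (x y dx dy : Int) (indent : String) : String :=
  "\n            " ++ indent ++ "if (d" ++ PySem.Int.toStr (pyEncode x y) ++ " > d" ++
    PySem.Int.toStr (pyEncode (x + dx) (y + dy)) ++ ") { // from (" ++ PySem.Int.toStr (x + dx) ++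
    ", " ++ PySem.Int.toStr (y + dy) ++ ")" ++
  "\n                " ++ indent ++ "d" ++ PySem.Int.toStr (pyEncode x y) ++ " = d" ++
    PySem.Int.toStr (pyEncode (x + dx) (y + dy)) ++ ";" ++
  "\n                " ++ indent ++ "dir" ++ PySem.Int.toStr (pyEncode x y) ++ " = " ++
    (if (x + dx, y + dy) = ((0 : Int), (0 : Int)) then dirAt (-dx, -dy)
     else "dir" ++ PySem.Int.toStr (pyEncode (x + dx) (y + dy))) ++ ";" ++
  "\n            " ++ indent ++ "}"

-- the sorted neighbour list (identical comprehension + sorted(...) in both Pythons)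
def dxdyList (radius x y : Int) : List (Int × Int) :=
  let l := (PySem.List.pyRange (-1) 2 1).flatMap (fun dx =>
    ((PySem.List.pyRange (-1) 2 1).filter (fun dy =>
      !((dx, dy) == ((0 : Int), (0 : Int))) && decide (pyDist (x + dx) (y + dy) ≤ radius))).map
      (fun dy => (dx, dy)))
  PySem.List.sorted l (fun dd => pyDist (x + dd.1) (y + dd.2)) false

-- the body of A's innermost loop (over y): two guarded blocks, exactly as in the source
def aCell (radius occupied_val r2 : Int) (st : PySem.Set Int × String) (x y : Int) :
    PySem.Set Int × String :=
  let st1 :=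
    if pyDist x y == r2 then
      let visited := st.1
      let out := st.2 ++ "\n        if (rc.canSenseLocation(l" ++
        PySem.Int.toStr (pyEncode x y) ++ ")) { // check (" ++ PySem.Int.toStr x ++ ", " ++
        PySem.Int.toStr y ++ ")"
      let out :=
        if r2 ≤ occupied_val then
          out ++ "\n            if (!rc.isLocationOccupied(l" ++
            PySem.Int.toStr (pyEncode x y) ++ ")) { "
        else out
      let indent : String := if r2 ≤ occupied_val then "    " else ""
      let out := (dxdyList radius x y).foldl (fun out dd =>
        if PySem.Set.contains visited (pyEncode (x + dd.1) (y + dd.2)) then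
          out ++ relaxPiece x y dd.1 dd.2 indent
        else out) out
      let out := out ++ "\n            " ++ indent ++ "d" ++ PySem.Int.toStr (pyEncode x y) ++
        " += locationScore(l" ++ PySem.Int.toStr (pyEncode x y) ++ ", m" ++
        PySem.Int.toStr (pyEncode x y) ++ ", dir" ++ PySem.Int.toStr (pyEncode x y) ++ ");"
      let out := if r2 ≤ occupied_val then out ++ "\n            }" else out
      let visited := PySem.Set.add visited (pyEncode x y)
      let out := out ++ "\n        }"
      (visited, out)
    else st
  if pyDist x y == r2 then
    let visited := st1.1
    let out := st1.2 ++ "\n        else if (rc.onTheMap(l" ++ PySem.Int.toStr (pyEncode x y) ++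
      ")) { // check (" ++ PySem.Int.toStr x ++ ", " ++ PySem.Int.toStr y ++ ")"
    let out := (dxdyList radius x y).foldl (fun out dd =>
      if PySem.Set.contains visited (pyEncode (x + dd.1) (y + dd.2)) then
        out ++ relaxPiece x y dd.1 dd.2 ""
      else out) out
    let out := out ++ "\n            d" ++ PySem.Int.toStr (pyEncode x y) ++ " += 12;"
    let visited := PySem.Set.add visited (pyEncode x y)
    let out := out ++ "\n        }\n"
    (visited, out)
  else st1

def gen_bfs (radius : Int) (unit : String) : String :=
  let occupied_val : Int := if unit == "Carrier" then 8 else 2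
  let st0 : PySem.Set Int × String := (PySem.Set.ofList [pyEncode 0 0], "\n")
  ((PySem.List.pyRange 1 (radius + 1) 1).foldl (fun st r2 =>
    (PySem.List.pyRange (-7) 8 1).foldl (fun st x =>
      (PySem.List.pyRange (-7) 8 1).foldl (fun st y =>
        aCell radius occupied_val r2 st x y) st) st) st0).2

-- ===== PORT B =====
-- _relax_lines(radius, x, y, indent, visited)
def relaxLines (radius x y : Int) (indent : String) (visited : PySem.Set Int) : String :=
  (dxdyList radius x y).foldl (fun s dd =>
    if PySem.Set.contains visited (pyEncode (x + dd.1) (y + dd.2)) then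
      s ++ relaxPiece x y dd.1 dd.2 indent
    else s) ""

-- the body B runs once per kept cell (both branches, r2 recomputed from the cell)
def bCell (radius occupied_val : Int) (st : PySem.Set Int × String) (c : Int × Int) :
    PySem.Set Int × String :=
  let x := c.1
  let y := c.2
  let r2 := pyDist x y
  let e := pyEncode x y
  let visited := st.1
  let out := st.2 ++ "\n        if (rc.canSenseLocation(l" ++ PySem.Int.toStr e ++
    ")) { // check (" ++ PySem.Int.toStr x ++ ", " ++ PySem.Int.toStr y ++ ")"
  let indent : String := if r2 ≤ occupied_val then "    " else ""
  let out := if r2 ≤ occupied_val then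
      out ++ "\n            if (!rc.isLocationOccupied(l" ++ PySem.Int.toStr e ++ ")) { "
    else out
  let out := out ++ relaxLines radius x y indent visited
  let out := out ++ "\n            " ++ indent ++ "d" ++ PySem.Int.toStr e ++
    " += locationScore(l" ++ PySem.Int.toStr e ++ ", m" ++ PySem.Int.toStr e ++ ", dir" ++
    PySem.Int.toStr e ++ ");"
  let out := if r2 ≤ occupied_val then out ++ "\n            }" else out
  let visited := PySem.Set.add visited e
  let out := out ++ "\n        }"
  let out := out ++ "\n        else if (rc.onTheMap(l" ++ PySem.Int.toStr e ++
    ")) { // check (" ++ PySem.Int.toStr x ++ ", " ++ PySem.Int.toStr y ++ ")"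
  let out := out ++ relaxLines radius x y "" visited
  let out := out ++ "\n            d" ++ PySem.Int.toStr e ++ " += 12;"
  let visited := PySem.Set.add visited e
  let out := out ++ "\n        }\n"
  (visited, out)

-- cells = [(x, y) for x in range(-7, 8) for y in range(-7, 8)]
def bCells : List (Int × Int) :=
  (PySem.List.pyRange (-7) 8 1).flatMap (fun x =>
    (PySem.List.pyRange (-7) 8 1).map (fun y => (x, y)))

def gen_bfs_alt (radius : Int) (unit : String) : String :=
  let occupied_val : Int := if unit == "Carrier" then 8 else 2
  let order := PySem.List.sorted bCells (fun c => pyDist c.1 c.2) false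
  let st0 : PySem.Set Int × String := (PySem.Set.ofList [pyEncode 0 0], "\n")
  (order.foldl (fun st c =>
    if pyDist c.1 c.2 < 1 || radius < pyDist c.1 c.2 then st
    else bCell radius occupied_val st c) st0).2

-- ===== PRECONDITION & SPEC =====
def Spec_gen_bfs (radius : Int) (unit : String) (out : String) : Prop := out = gen_bfs_alt radius unit
instance (radius : Int) (unit : String) (out : String) : Decidable (Spec_gen_bfs radius unit out) := by unfold Spec_gen_bfs; infer_instance

-- ===== CLAIM (what is proved, stated in full; the proofs are below) =====
def Claim_equal_gen_bfs : Prop := ∀ (radius : Int) (unit : String), Dom_gen_bfs radius unit → Spec_gen_bfs radius unit (gen_bfs radius unit)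

-- ===== LEMMAS AND PROOFS =====

-- the 34 distinct squared distances of the 15x15 grid, increasing
def pvDists : List Int :=
  [0, 1, 2, 4, 5, 8, 9, 10, 13, 16, 17, 18, 20, 25, 26, 29, 32, 34, 36, 37, 40, 41, 45,
   49, 50, 52, 53, 58, 61, 65, 72, 74, 85, 98]

-- the cells at squared distance r2, in A's x-major scan order
def pvFib (r2 : Int) : List (Int × Int) := bCells.filter (fun c => pyDist c.1 c.2 == r2)

-- the 225 grid cells in B's processing order (stable sort by squared distance), as a literal
def pvOrder : List (Int × Int) := [(0, 0), (-1, 0), (0, -1), (0, 1), (1, 0), (-1, -1), (-1, 1), (1, -1), (1, 1), (-2, 0), (0, -2), (0, 2), (2, 0), (-2, -1), (-2, 1), (-1, -2), (-1, 2), (1, -2), (1, 2), (2, -1), (2, 1), (-2, -2), (-2, 2), (2, -2), (2, 2), (-3, 0), (0, -3), (0, 3), (3, 0), (-3, -1), (-3, 1), (-1, -3), (-1, 3), (1, -3), (1, 3), (3, -1), (3, 1), (-3, -2), (-3, 2), (-2, -3), (-2, 3), (2, -3), (2, 3), (3, -2), (3, 2), (-4, 0), (0, -4), (0, 4), (4,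 0), (-4, -1), (-4, 1), (-1, -4), (-1, 4), (1, -4), (1, 4), (4, -1), (4, 1), (-3, -3), (-3, 3), (3, -3), (3, 3), (-4, -2), (-4, 2), (-2, -4), (-2, 4), (2, -4), (2, 4), (4, -2), (4, 2), (-5, 0), (-4, -3), (-4, 3), (-3, -4), (-3, 4), (0, -5), (0, 5), (3, -4), (3, 4), (4, -3), (4, 3), (5, 0), (-5, -1), (-5, 1), (-1, -5), (-1, 5), (1, -5), (1, 5), (5, -1), (5, 1), (-5, -2), (-5, 2), (-2, -5), (-2, 5), (2, -5), (2, 5), (5, -2), (5, 2), (-4, -4), (-4, 4), (4, -4), (4, 4), (-5, -3), (-5, 3), (-3, -5), (-3, 5), (3, -5), (3, 5), (5, -3), (5, 3), (-6, 0), (0, -6), (0, 6), (6, 0), (-6, -1), (-6, 1), (-1, -6), (-1, 6), (1, -6), (1, 6), (6, -1), (6, 1), (-6, -2), (-6, 2), (-2, -6), (-2, 6), (2, -6), (2, 6), (6, -2), (6, 2), (-5, -4), (-5, 4), (-4, -5), (-4, 5), (4, -5), (4, 5), (5, -4), (5, 4), (-6, -3), (-6, 3), (-3, -6), (-3, 6),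 (3, -6), (3, 6), (6, -3), (6, 3), (-7, 0), (0, -7), (0, 7), (7, 0), (-7, -1), (-7, 1), (-5, -5), (-5, 5), (-1, -7), (-1, 7), (1, -7), (1, 7), (5, -5), (5, 5), (7, -1), (7, 1), (-6, -4), (-6, 4), (-4, -6), (-4, 6), (4, -6), (4, 6), (6, -4), (6, 4), (-7, -2), (-7, 2), (-2, -7), (-2, 7), (2, -7), (2, 7), (7, -2), (7, 2), (-7, -3), (-7, 3), (-3, -7), (-3, 7), (3, -7), (3, 7), (7, -3), (7, 3), (-6, -5), (-6, 5), (-5, -6), (-5, 6), (5, -6), (5, 6), (6, -5), (6, 5), (-7, -4), (-7, 4), (-4, -7), (-4, 7), (4, -7), (4, 7), (7, -4), (7, 4), (-6, -6), (-6, 6), (6, -6), (6, 6), (-7, -5), (-7, 5), (-5, -7), (-5, 7), (5, -7), (5, 7), (7, -5), (7, 5), (-7, -6), (-7, 6), (-6, -7), (-6, 7), (6, -7), (6, 7), (7, -6), (7, 6), (-7, -7), (-7, 7), (7, -7), (7, 7)]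

set_option maxRecDepth 1500000 in
theorem pv_sorted_eq_order :
    PySem.List.sorted bCells (fun c => pyDist c.1 c.2) false = pvOrder := by decide

set_option maxRecDepth 400000 in
theorem pv_flatMap_eq_order : pvDists.flatMap pvFib = pvOrder := by decide

theorem pv_order_eq :
    PySem.List.sorted bCells (fun c => pyDist c.1 c.2) false = pvDists.flatMap pvFib := by
  rw [pv_sorted_eq_order, pv_flatMap_eq_order]

set_option maxRecDepth 400000 in
theorem pv_dist_mem : ∀ c ∈ bCells, pyDist c.1 c.2 ∈ pvDists := by decide

theorem pv_dists_sorted : pvDists.Pairwise (· < ·) := by decide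

-- a conditional string-append fold factors through ""
theorem pv_foldl_append_factor {β : Type} (q : β → Bool) (g : β → String) :
    ∀ (l : List β) (s : String),
      l.foldl (fun out dd => if q dd then out ++ g dd else out) s =
        s ++ l.foldl (fun out dd => if q dd then out ++ g dd else out) "" := by
  intro l
  induction l with
  | nil => intro s; simp
  | cons a t ih =>
    intro s
    simp only [List.foldl_cons]
    rw [ih, ih (if q a then "" ++ g a else "")]
    by_cases h : q a = true <;>
      simp [h, String.append_assoc, String.empty_append]

theorem pv_aCell_eq (radius ov : Int) (st : PySem.Set Int × String) (x y : Int) :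
    aCell radius ov (pyDist x y) st x y = bCell radius ov st (x, y) := by
  unfold aCell bCell relaxLines
  simp only [beq_self_eq_true, if_true]
  by_cases h : pyDist x y ≤ ov <;>
    · simp only [h, if_true, if_false]
      rw [pv_foldl_append_factor, pv_foldl_append_factor]

theorem pv_flatMap_filter_of_nil {α β : Type} (f : α → List β) (q : α → Bool)
    (h : ∀ a, q a = false → f a = []) :
    ∀ l : List α, l.flatMap f = (l.filter q).flatMap f := by
  intro l
  induction l with
  | nil => rfl
  | cons a t ih =>
    cases hq : q a with
    | true => simp [hq, ih]
    | false => simp [hq, ih, h a hq]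

theorem pv_flatMap_congr_ite {β : Type} (g f : Int → List β) (p : Int → Bool) :
    ∀ L : List Int, (∀ k ∈ L, g k = if p k then f k else []) →
      L.flatMap g = (L.filter p).flatMap f := by
  intro L
  induction L with
  | nil => intro _; rfl
  | cons a t ih =>
    intro h
    have ha := h a (by simp)
    cases hp : p a with
    | true => simp [hp, ha, ih (fun k hk => h k (by simp [hk]))]
    | false => simp [hp, hp ▸ ha, ih (fun k hk => h k (by simp [hk]))]

theorem pv_filter_le_extend :
    ∀ (L : List Int), L.Pairwise (· < ·) → ∀ m : Int, 1 ≤ m →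
      L.filter (fun k => decide (1 ≤ k) && decide (k ≤ m)) =
        L.filter (fun k => decide (1 ≤ k) && decide (k ≤ m - 1)) ++
          (if m ∈ L then [m] else []) := by
  intro L
  induction L with
  | nil => intro _ m _; simp
  | cons a t ih =>
    intro hL m hm
    obtain ⟨ha, ht⟩ := List.pairwise_cons.mp hL
    simp only [List.filter_cons]
    by_cases h1 : 1 ≤ a
    · by_cases h3 : a ≤ m - 1
      · have hne : a ≠ m := by omega
        have : (m ∈ a :: t) = (m ∈ t) := by simp [List.mem_cons, Ne.symm hne]
        simp [h1, h3, (by omega : a ≤ m), this, ih ht m hm]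
      · by_cases h2 : a ≤ m
        · have ham : a = m := by omega
          have hnil1 : t.filter (fun k => decide (1 ≤ k) && decide (k ≤ m)) = [] :=
            List.filter_eq_nil_iff.mpr (fun b hb => by
              have := ha b hb; simp; omega)
          have hnil2 : t.filter (fun k => decide (1 ≤ k) && decide (k ≤ m - 1)) = [] :=
            List.filter_eq_nil_iff.mpr (fun b hb => by
              have := ha b hb; simp; omega)
          have hnil3 : t.filter (fun k => decide (1 ≤ k) && decide (k < m)) = [] :=
            List.filter_eq_nil_iff.mpr (fun b hb => by
              have := ha b hb; simp; omega)
          subst ham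
          simp [h1, h3, hnil1, hnil3]
        · have hne : a ≠ m := by omega
          have : (m ∈ a :: t) = (m ∈ t) := by simp [List.mem_cons, Ne.symm hne]
          simp [h2, h3, this, ih ht m hm]
    · have hne : a ≠ m := by omega
      have : (m ∈ a :: t) = (m ∈ t) := by simp [List.mem_cons, Ne.symm hne]
      simp [h1, this, ih ht m hm]

theorem pv_range_filter (L : List Int) (hL : L.Pairwise (· < ·)) (n : Int) :
    (PySem.List.pyRange 1 (n + 1) 1).filter (fun k => decide (k ∈ L)) =
      L.filter (fun k => decide (1 ≤ k) && decide (k ≤ n)) := by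
  by_cases hneg : n < 0
  · rw [PySem.List.pyRange_one_eq_nil (by omega)]
    refine (List.filter_eq_nil_iff.mpr (fun b _ => by simp; omega)).symm
  · have h0 : (0 : Int) ≤ n := by omega
    clear hneg
    induction n, h0 using Int.le_induction with
    | base =>
      rw [PySem.List.pyRange_one_eq_nil (by omega)]
      refine (List.filter_eq_nil_iff.mpr (fun b _ => by simp; omega)).symm
    | succ n hn ihn =>
      rw [PySem.List.pyRange_one_succ_right (by omega), List.filter_append]
      rw [pv_filter_le_extend L hL (n + 1) (by omega)]
      have hmid : n + 1 - 1 = n := by ring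
      rw [hmid, ihn]
      congr 1
      simp [List.filter_cons]

-- A's nested r2/x/y loops and B's single pass over the sorted grid compute the same fold
theorem pv_cellstep (radius ov r2 : Int) (st : PySem.Set Int × String) :
    (PySem.List.pyRange (-7) 8 1).foldl (fun st x =>
      (PySem.List.pyRange (-7) 8 1).foldl (fun st y => aCell radius ov r2 st x y) st) st
    = (pvFib r2).foldl (bCell radius ov) st := by
  have h1 : bCells.foldl (fun st c => aCell radius ov r2 st c.1 c.2) st
      = (PySem.List.pyRange (-7) 8 1).foldl (fun st x =>
          (PySem.List.pyRange (-7) 8 1).foldl (fun st y => aCell radius ov r2 st x y) st) st := by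
    unfold bCells
    rw [List.foldl_flatMap]
    refine PySem.List.foldl_congr_mem _ _ _ _ ?_
    intro acc x _
    rw [List.foldl_map]
  rw [← h1]
  unfold pvFib
  rw [List.foldl_filter]
  refine PySem.List.foldl_congr_mem _ _ _ _ ?_
  intro acc c _
  by_cases h : pyDist c.1 c.2 = r2
  · subst h
    rw [if_pos (by simp)]
    simpa using pv_aCell_eq radius ov acc c.1 c.2
  · rw [if_neg (by simpa using h)]
    unfold aCell
    simp [h]

theorem pv_main (radius ov : Int) (st0 : PySem.Set Int × String) :
    (PySem.List.pyRange 1 (radius + 1) 1).foldl (fun st r2 =>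
      (PySem.List.pyRange (-7) 8 1).foldl (fun st x =>
        (PySem.List.pyRange (-7) 8 1).foldl (fun st y => aCell radius ov r2 st x y) st) st) st0
    = (PySem.List.sorted bCells (fun c => pyDist c.1 c.2) false).foldl (fun st c =>
        if pyDist c.1 c.2 < 1 || radius < pyDist c.1 c.2 then st
        else bCell radius ov st c) st0 := by
  have hA : (PySem.List.pyRange 1 (radius + 1) 1).foldl (fun st r2 =>
      (PySem.List.pyRange (-7) 8 1).foldl (fun st x =>
        (PySem.List.pyRange (-7) 8 1).foldl (fun st y => aCell radius ov r2 st x y) st) st) st0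
      = ((PySem.List.pyRange 1 (radius + 1) 1).flatMap pvFib).foldl (bCell radius ov) st0 := by
    rw [List.foldl_flatMap]
    refine (PySem.List.foldl_congr_mem _ _ _ _ ?_).symm
    intro acc r2 _
    exact (pv_cellstep radius ov r2 acc).symm
  have hB : (PySem.List.sorted bCells (fun c => pyDist c.1 c.2) false).foldl (fun st c =>
        if pyDist c.1 c.2 < 1 || radius < pyDist c.1 c.2 then st
        else bCell radius ov st c) st0
      = ((pvDists.filter (fun k => decide (1 ≤ k) && decide (k ≤ radius))).flatMap
          pvFib).foldl (bCell radius ov) st0 := by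
    rw [pv_order_eq]
    have hfun : (pvDists.flatMap pvFib).foldl (fun st c =>
          if pyDist c.1 c.2 < 1 || radius < pyDist c.1 c.2 then st
          else bCell radius ov st c) st0
        = (pvDists.flatMap pvFib).foldl (fun st c =>
            if decide (1 ≤ pyDist c.1 c.2) && decide (pyDist c.1 c.2 ≤ radius) then
              bCell radius ov st c
            else st) st0 := by
      refine PySem.List.foldl_congr_mem _ _ _ _ ?_
      intro acc c _
      by_cases h1 : 1 ≤ pyDist c.1 c.2 <;> by_cases h2 : pyDist c.1 c.2 ≤ radius <;>
        simp [h1, h2]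
    rw [hfun, ← List.foldl_filter, List.filter_flatMap]
    congr 1
    refine pv_flatMap_congr_ite _ pvFib _ pvDists ?_
    intro k _
    by_cases hp : (decide (1 ≤ k) && decide (k ≤ radius)) = true
    · rw [if_pos hp]
      refine List.filter_eq_self.mpr ?_
      intro c hc
      have hck : pyDist c.1 c.2 = k := by
        have := (List.mem_filter.mp hc).2
        simpa using this
      rw [hck]
      exact hp
    · rw [if_neg hp]
      refine List.filter_eq_nil_iff.mpr ?_
      intro c hc
      have hck : pyDist c.1 c.2 = k := by
        have := (List.mem_filter.mp hc).2
        simpa using this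
      rw [hck]
      exact hp
  have hnil : ∀ a : Int, (decide (a ∈ pvDists)) = false → pvFib a = [] := by
    intro a ha
    refine List.filter_eq_nil_iff.mpr ?_
    intro c hc
    have := pv_dist_mem c hc
    simp only [decide_eq_false_iff_not] at ha
    simp only [beq_iff_eq]
    intro hEq
    exact ha (hEq ▸ this)
  rw [hA, hB,
    pv_flatMap_filter_of_nil pvFib (fun k => decide (k ∈ pvDists)) hnil
      (PySem.List.pyRange 1 (radius + 1) 1),
    pv_range_filter pvDists pv_dists_sorted radius]

-- ===== VERDICT (by name: the statement is the Claim_ definition above) =====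
theorem gen_bfs_spec : Claim_equal_gen_bfs := by
  intro radius unit _
  unfold Spec_gen_bfs gen_bfs gen_bfs_alt
  dsimp only
  rw [pv_main]
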